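-- pv_equiv track=rewrite | github.com/Ali0vz/CamelUp | main.py | analise_orders
-- ===== SOURCE A (Python) =====
-- def analise_orders(all_orders):
--     first_second_last_won = []
--     for i in range(5):
--         temp = []
--         for j in range(4):
--             temp.append(0)
--         first_second_last_won.append(temp)
--     for each_order in all_orders:
--         first = [0]
--         second = [0]
--         last = [100]
--         for tile_with_camel in each_order:
--             if tile_with_camel[0] > first[0]:
--                 first = tile_with_camel
--             if tile_with_camel[0] < last[0]:
--                 last = tile_with_camel
--         for tile_with_camel in each_order:
--             if second[0] < tile_with_camel[0] < first[0]:
--                 second = tile_with_camel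
--
--         firt_leghth = len(first)
--         indx = first[firt_leghth - 1]
--         temp = first_second_last_won[indx]
--         temp[0] = temp[0] + 1
--         if first[0] > 16:
--             temp[3] = temp[3] + 1
--         if firt_leghth > 2:
--             indx = first[firt_leghth - 2]
--             temp = first_second_last_won[indx]
--             temp[1] = temp[1] + 1
--         else:
--             indx = second[len(second) - 1]
--             temp = first_second_last_won[indx]
--             temp[1] = temp[1] + 1
--
--         indx = last[1]
--         temp = first_second_last_won[indx]
--         temp[2] = temp[2] + 1
--     return first_second_last_won
-- ===== SOURCE B (Python) =====
-- def analise_orders(all_orders):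
--     # One pass per order maintaining first/second/last together, functional tally.
--     table = [[0, 0, 0, 0] for _ in range(5)]
--     for order in all_orders:
--         first, second, last = [0], [0], [100]
--         for t in order:
--             if t[0] > first[0]:
--                 first, second = t, first
--             elif second[0] < t[0] < first[0]:
--                 second = t
--             if t[0] < last[0]:
--                 last = t
--         table[first[-1]][0] += 1
--         if first[0] > 16:
--             table[first[-1]][3] += 1
--         runner_up = first[-2] if len(first) > 2 else second[-1]
--         table[runner_up][1] += 1
--         table[last[1]][2] += 1
--     return table
-- ===== Notes on version B (the rewrite author's own statement) =====
-- stated objective: simpler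
-- what changed: B finds first, second and last in a single pass per order (demoting the old leader into second on a new maximum) instead of A's two separate scans, and builds the tally table with a comprehension and direct indexed updates.
import Mathlib
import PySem

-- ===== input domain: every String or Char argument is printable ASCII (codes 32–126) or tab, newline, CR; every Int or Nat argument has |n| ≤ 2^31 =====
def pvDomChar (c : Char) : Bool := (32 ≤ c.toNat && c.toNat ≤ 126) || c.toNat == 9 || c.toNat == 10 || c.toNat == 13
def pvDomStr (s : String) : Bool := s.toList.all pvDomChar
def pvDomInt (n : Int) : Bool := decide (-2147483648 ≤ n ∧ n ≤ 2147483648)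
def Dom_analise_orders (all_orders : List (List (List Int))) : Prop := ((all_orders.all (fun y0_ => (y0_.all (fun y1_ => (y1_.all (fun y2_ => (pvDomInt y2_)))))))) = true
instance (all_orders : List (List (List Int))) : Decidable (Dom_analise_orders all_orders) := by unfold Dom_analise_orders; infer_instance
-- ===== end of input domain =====

-- B merges A's two scans per order into one pass that maintains first/second/last together; simpler tallying.
-- Python A raises IndexError on some inputs (empty tiles/orders, out-of-range camel indices); Pre_ excludes those.

-- t[0] with default (Pre_ keeps every tile nonempty, so the default is never the Python value)
def hd0 (t : List Int) : Int := PySem.List.pyGetD t 0 0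

-- table[i][k] += 1  (shared helper for the mutation 'temp = table[indx]; temp[k] = temp[k] + 1')
def bump (tab : List (List Int)) (i : Int) (k : Int) : List (List Int) :=
  PySem.List.pySetD tab i
    (PySem.List.pySetD (PySem.List.pyGetD tab i []) k
      (PySem.List.pyGetD (PySem.List.pyGetD tab i []) k 0 + 1))

-- ===== PORT A =====
-- A's first loop: updates first and last with two independent ifs
def aFL (fl : List Int × List Int) (t : List Int) : List Int × List Int :=
  (if hd0 t > hd0 fl.1 then t else fl.1,
   if hd0 t < hd0 fl.2 then t else fl.2)

-- A's second loop body: second update against the final first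
def aSecond (first s t : List Int) : List Int :=
  if hd0 s < hd0 t ∧ hd0 t < hd0 first then t else s

-- A's tallying block for one order
def aTally (tab : List (List Int)) (first second last : List Int) : List (List Int) :=
  let n : Int := (first.length : Int)
  let indx := PySem.List.pyGetD first (n - 1) 0
  let tab := bump tab indx 0
  let tab := if hd0 first > 16 then bump tab indx 3 else tab
  let tab :=
    if n > 2 then bump tab (PySem.List.pyGetD first (n - 2) 0) 1
    else bump tab (PySem.List.pyGetD second ((second.length : Int) - 1) 0) 1
  bump tab (PySem.List.pyGetD last 1 0) 2

def aStep (tab : List (List Int)) (order : List (List Int)) : List (List Int) :=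
  let fl := order.foldl aFL ([0], [100])
  let second := order.foldl (aSecond fl.1) [0]
  aTally tab fl.1 second fl.2

def analise_orders (all_orders : List (List (List Int))) : List (List Int) :=
  let tab0 := (PySem.List.pyRange 0 5 1).foldl
    (fun acc _ => acc ++ [(PySem.List.pyRange 0 4 1).foldl (fun r _ => r ++ [(0 : Int)]) []]) []
  all_orders.foldl aStep tab0

-- ===== PORT B =====
-- B's single loop body: first/second/last maintained together
def bStep3 (fsl : List Int × List Int × List Int) (t : List Int) : List Int × List Int × List Int :=
  let fs :=
    if hd0 t > hd0 fsl.1 then (t, fsl.1)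
    else if hd0 fsl.2.1 < hd0 t ∧ hd0 t < hd0 fsl.1 then (fsl.1, t)
    else (fsl.1, fsl.2.1)
  (fs.1, fs.2, if hd0 t < hd0 fsl.2.2 then t else fsl.2.2)

def bTally (tab : List (List Int)) (first second last : List Int) : List (List Int) :=
  let tab := bump tab (PySem.List.pyGetD first (-1) 0) 0
  let tab := if hd0 first > 16 then bump tab (PySem.List.pyGetD first (-1) 0) 3 else tab
  let ru := if first.length > 2 then PySem.List.pyGetD first (-2) 0 else PySem.List.pyGetD second (-1) 0
  let tab := bump tab ru 1
  bump tab (PySem.List.pyGetD last 1 0) 2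

def bStep (tab : List (List Int)) (order : List (List Int)) : List (List Int) :=
  let fsl := order.foldl bStep3 ([0], [0], [100])
  bTally tab fsl.1 fsl.2.1 fsl.2.2

def analise_orders_alt (all_orders : List (List (List Int))) : List (List Int) :=
  let tab0 := (PySem.List.pyRange 0 5 1).map (fun _ => ([0, 0, 0, 0] : List Int))
  all_orders.foldl bStep tab0

-- ===== PRECONDITION & SPEC =====
-- declarative selections (used only to state Pre_): A's loops pick the earliest maximal tile (if its
-- position is positive), the earliest tile below the leader's maximum, and the earliest minimal tile
def headv (t : List Int) : Int := t.getD 0 0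

def selFirst (order : List (List Int)) : List Int :=
  (order.find? (fun t => order.all (fun u => headv u ≤ headv t) && decide (0 < headv t))).getD [0]

def selSecond (order : List (List Int)) (f : List Int) : List Int :=
  (order.find? (fun t =>
    order.all (fun u => headv u ≤ headv t || headv f ≤ headv u) &&
    decide (0 < headv t) && decide (headv t < headv f))).getD [0]

def selLast (order : List (List Int)) : List Int :=
  (order.find? (fun t => order.all (fun u => headv t ≤ headv u) && decide (headv t < 100))).getD [100]

-- exactly the inputs on which Python A returns (no IndexError): every tile nonempty, the table indices
-- the order's selected tiles supply lie in Python's accepted range -5..4, and the minimal tile (needed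
-- for last[1]) exists and has a second entry
def Pre_analise_orders (all_orders : List (List (List Int))) : Prop :=
  ∀ order ∈ all_orders, (∀ t ∈ order, t ≠ []) ∧
    (-5 ≤ (selFirst order).getD ((selFirst order).length - 1) 0 ∧
      (selFirst order).getD ((selFirst order).length - 1) 0 ≤ 4) ∧
    (2 < (selFirst order).length →
      -5 ≤ (selFirst order).getD ((selFirst order).length - 2) 0 ∧
        (selFirst order).getD ((selFirst order).length - 2) 0 ≤ 4) ∧
    (¬ 2 < (selFirst order).length →
      -5 ≤ (selSecond order (selFirst order)).getD ((selSecond order (selFirst order)).length - 1) 0 ∧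
        (selSecond order (selFirst order)).getD ((selSecond order (selFirst order)).length - 1) 0 ≤ 4) ∧
    2 ≤ (selLast order).length ∧
    (-5 ≤ (selLast order).getD 1 0 ∧ (selLast order).getD 1 0 ≤ 4)

instance (all_orders : List (List (List Int))) : Decidable (Pre_analise_orders all_orders) := by
  unfold Pre_analise_orders; infer_instance

def pvWitness_analise_orders : List (List (List Int)) := [[[3, 2], [1, 0]]]

def Spec_analise_orders (all_orders : List (List (List Int))) (out : List (List Int)) : Prop :=
  out = analise_orders_alt all_orders

instance (all_orders : List (List (List Int))) (out : List (List Int)) : Decidable (Spec_analise_orders all_orders out) := by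
  unfold Spec_analise_orders; infer_instance

-- ===== CLAIM (what is proved, stated in full; the proofs are below) =====
def Claim_equal_analise_orders : Prop := ∀ (all_orders : List (List (List Int))), Dom_analise_orders all_orders → Pre_analise_orders all_orders → Spec_analise_orders all_orders (analise_orders all_orders)

-- ===== LEMMAS AND PROOFS =====

-- canonical "running maximum" fold (A's first component and B's first component both compute it)
def fMax (f t : List Int) : List Int := if hd0 t > hd0 f then t else f
def lMin (l t : List Int) : List Int := if hd0 t < hd0 l then t else l

theorem aFL_fst (p : List (List Int)) : ∀ f l, (p.foldl aFL (f, l)).1 = p.foldl fMax f := by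
  induction p with
  | nil => intro f l; rfl
  | cons t p ih => intro f l; simp only [List.foldl, aFL, fMax]; exact ih _ _

theorem aFL_snd (p : List (List Int)) : ∀ f l, (p.foldl aFL (f, l)).2 = p.foldl lMin l := by
  induction p with
  | nil => intro f l; rfl
  | cons t p ih => intro f l; simp only [List.foldl, aFL, lMin]; exact ih _ _

theorem bStep3_fst (p : List (List Int)) : ∀ f s l, (p.foldl bStep3 (f, s, l)).1 = p.foldl fMax f := by
  induction p with
  | nil => intro f s l; rfl
  | cons t p ih =>
    intro f s l
    simp only [List.foldl, bStep3, fMax]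
    split_ifs with h1 h2 <;> exact ih _ _ _

theorem bStep3_last (p : List (List Int)) : ∀ f s l, (p.foldl bStep3 (f, s, l)).2.2 = p.foldl lMin l := by
  induction p with
  | nil => intro f s l; rfl
  | cons t p ih =>
    intro f s l
    simp only [List.foldl, bStep3, lMin]
    split_ifs with h1 h2 <;> exact ih _ _ _

theorem fMax_mono (p : List (List Int)) : ∀ f, hd0 f ≤ hd0 (p.foldl fMax f) := by
  induction p with
  | nil => intro f; exact le_refl _
  | cons t p ih =>
    intro f
    simp only [List.foldl, fMax]
    split_ifs with h
    · exact le_trans (le_of_lt h) (ih t)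
    · exact ih f

theorem fMax_le (p : List (List Int)) : ∀ f t, t ∈ p → hd0 t ≤ hd0 (p.foldl fMax f) := by
  induction p with
  | nil => intro f t ht; cases ht
  | cons u p ih =>
    intro f t ht
    simp only [List.foldl]
    rcases List.mem_cons.1 ht with rfl | ht
    · refine le_trans ?_ (fMax_mono p (fMax f t))
      simp only [fMax]; split_ifs with h
      · exact le_refl _
      · omega
    · exact ih _ t ht

-- when every head is below the bound, A's "second" fold coincides with the running-max fold
theorem aSecond_eq_fMax (p : List (List Int)) :
    ∀ (b f : List Int), (∀ t ∈ p, hd0 t < hd0 b) → hd0 f < hd0 b →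
      p.foldl (aSecond b) f = p.foldl fMax f := by
  induction p with
  | nil => intro b f _ _; rfl
  | cons t p ih =>
    intro b f hall hf
    have ht : hd0 t < hd0 b := hall t (List.mem_cons_self ..)
    simp only [List.foldl, aSecond, fMax]
    have hcond : (hd0 f < hd0 t ∧ hd0 t < hd0 b) ↔ hd0 t > hd0 f := by constructor <;> intro h <;> [exact h.1; exact ⟨h, ht⟩]
    rw [if_congr hcond rfl rfl]
    split_ifs with h
    · exact ih b t (fun u hu => hall u (List.mem_cons_of_mem _ hu)) ht
    · exact ih b f (fun u hu => hall u (List.mem_cons_of_mem _ hu)) hf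

-- key invariant: B's one-pass "second" equals A's second fold taken against the final maximum
theorem second_eq (p : List (List Int)) :
    (p.foldl bStep3 ([0], [0], [100])).2.1 = p.foldl (aSecond (p.foldl fMax [0])) [0] := by
  induction p using List.reverseRecOn with
  | nil => rfl
  | append_singleton p t ih =>
    rw [List.foldl_append, List.foldl_append, List.foldl_append]
    set X := p.foldl bStep3 ([0], [0], [100]) with hX
    have hF : X.1 = p.foldl fMax [0] := bStep3_fst p [0] [0] [100]
    simp only [List.foldl]
    by_cases h : hd0 t > hd0 X.1
    · -- t becomes the new maximum; the old maximum becomes second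
      have hnewmax : (fMax (p.foldl fMax [0]) t) = t := by
        simp only [fMax]; rw [if_pos (by rw [← hF]; exact h)]
      rw [hnewmax]
      have hall : ∀ u ∈ p, hd0 u < hd0 t := by
        intro u hu; exact lt_of_le_of_lt (by rw [hF]; exact fMax_le p [0] u hu) h
      have h0 : hd0 ([0] : List Int) < hd0 t := by
        have := fMax_mono p ([0] : List Int); rw [← hF] at this; omega
      rw [aSecond_eq_fMax p t [0] hall h0]
      show (bStep3 X t).2.1 = aSecond t (p.foldl fMax [0]) t
      simp only [bStep3, aSecond]
      rw [if_pos h, if_neg (by omega)]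
      exact hF.symm ▸ rfl
    · -- maximum unchanged; both sides apply the same conditional update
      have hsame : (fMax (p.foldl fMax [0]) t) = p.foldl fMax [0] := by
        simp only [fMax]; rw [if_neg (by rw [← hF]; exact h)]
      rw [hsame, ← ih]
      show (bStep3 X t).2.1 = aSecond (p.foldl fMax [0]) X.2.1 t
      simp only [bStep3, aSecond]
      rw [if_neg h, ← hF]
      split_ifs with h2 <;> rfl

-- xs[-1] = xs[len(xs)-1] (both sides default the same way on [])
theorem getD_neg_one (xs : List Int) :
    PySem.List.pyGetD xs (-1) 0 = PySem.List.pyGetD xs ((xs.length : Int) - 1) 0 := by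
  cases xs with
  | nil => rfl
  | cons x l =>
    have hlen : 0 < (x :: l).length := by simp
    have hcast : ((x :: l).length : Int) - 1 = (((x :: l).length - 1 : Nat) : Int) := by omega
    rw [hcast, PySem.List.pyGetD_natCast,
        PySem.List.pyGetD_neg_ofNat (x :: l) 1 0 (by omega) (by omega)]
    rw [List.getD_eq_getElem _ _ (by omega)]

-- xs[-2] = xs[len(xs)-2] when len(xs) > 2
theorem getD_neg_two (xs : List Int) (h : 2 < xs.length) :
    PySem.List.pyGetD xs (-2) 0 = PySem.List.pyGetD xs ((xs.length : Int) - 2) 0 := by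
  have hcast : ((xs.length : Int)) - 2 = ((xs.length - 2 : Nat) : Int) := by omega
  rw [hcast, PySem.List.pyGetD_natCast,
      PySem.List.pyGetD_neg_ofNat xs 2 0 (by omega) (by omega)]
  rw [List.getD_eq_getElem _ _ (by omega)]

theorem tally_eq (tab : List (List Int)) (first second last : List Int) :
    bTally tab first second last = aTally tab first second last := by
  simp only [bTally, aTally, getD_neg_one first, getD_neg_one second]
  have hcond : (first.length > 2) ↔ ((first.length : Int) > 2) := by exact_mod_cast Iff.rfl
  by_cases h : first.length > 2
  · rw [if_pos h, if_pos (hcond.1 h), getD_neg_two first h]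
  · rw [if_neg h, if_neg (fun hh => h (hcond.2 hh))]

theorem step_eq (tab : List (List Int)) (order : List (List Int)) :
    bStep tab order = aStep tab order := by
  simp only [bStep, aStep]
  rw [tally_eq, bStep3_fst, bStep3_last, second_eq, aFL_fst, aFL_snd]

theorem fold_eq (ao : List (List (List Int))) :
    ∀ tab, ao.foldl bStep tab = ao.foldl aStep tab := by
  induction ao with
  | nil => intro tab; rfl
  | cons o ao ih => intro tab; simp only [List.foldl]; rw [step_eq]; exact ih _

-- ===== VERDICT (by name: the statement is the Claim_ definition above) =====
theorem analise_orders_spec : Claim_equal_analise_orders := by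
  intro ao _ _
  unfold Spec_analise_orders analise_orders analise_orders_alt
  rw [fold_eq]
  congr 1
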